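-- pv_equiv track=rewrite | github.com/cisco/OpenOSC | tools/oscmetrics.py | reorder_osc_functions
-- ===== SOURCE A (Python) =====
-- g_libc_functions = ['memcpy', 'memmove', 'memset', 'bcopy', 'bzero',
--                     'strcpy', 'strncpy', 'strcat', 'strncat', 'strnlen', 'vsnprintf']
--
-- g_safec_functions = ['memcmp_s', 'memcpy_s', 'strcat_s', 'strcmp_s', 'strcpy_s',
--                      'strncat_s', 'strncpy_s', 'strnlen_s', 'strstr_s']
--
-- def reorder_osc_functions(funcs):
--     """ Reorder OSC functions based on libc/safec/other category
--     """
--     result = []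
--     libc_funcs = []
--     safec_funcs = []
--     other_funcs = []
--     for func in funcs:
--         if func == 'FILEMAGICS' or func == 'SUM_STATS':
--             continue
--         if func in g_libc_functions:
--             libc_funcs.append(func)
--         elif func in g_safec_functions:
--             safec_funcs.append(func)
--         else:
--             other_funcs.append(func)
--     libc_funcs.sort()
--     safec_funcs.sort()
--     other_funcs.sort()
--     result.extend(libc_funcs)
--     result.extend(safec_funcs)
--     result.extend(other_funcs)
--     return result
-- ===== SOURCE B (Python) =====
-- g_libc_functions = ['memcpy', 'memmove', 'memset', 'bcopy', 'bzero',
--                     'strcpy', 'strncpy', 'strcat', 'strncat', 'strnlen', 'vsnprintf']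
--
-- g_safec_functions = ['memcmp_s', 'memcpy_s', 'strcat_s', 'strcmp_s', 'strcpy_s',
--                      'strncat_s', 'strncpy_s', 'strnlen_s', 'strstr_s']
--
--
-- def _rank(f):
--     if f in g_libc_functions:
--         return 0
--     if f in g_safec_functions:
--         return 1
--     return 2
--
--
-- def reorder_osc_functions(funcs):
--     """ Reorder OSC functions based on libc/safec/other category """
--     s = sorted(f for f in funcs if not (f == 'FILEMAGICS' or f == 'SUM_STATS'))
--     return [f for f in s if _rank(f) == 0] + \
--            [f for f in s if _rank(f) == 1] + \
--            [f for f in s if _rank(f) == 2]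
-- ===== Notes on version B (the rewrite author's own statement) =====
-- stated objective: alternative
-- what changed: Replaces the three accumulated bucket lists each sorted separately by one global sort of the filtered input followed by three rank-based filters whose concatenation reproduces the bucket order.
import Mathlib
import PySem

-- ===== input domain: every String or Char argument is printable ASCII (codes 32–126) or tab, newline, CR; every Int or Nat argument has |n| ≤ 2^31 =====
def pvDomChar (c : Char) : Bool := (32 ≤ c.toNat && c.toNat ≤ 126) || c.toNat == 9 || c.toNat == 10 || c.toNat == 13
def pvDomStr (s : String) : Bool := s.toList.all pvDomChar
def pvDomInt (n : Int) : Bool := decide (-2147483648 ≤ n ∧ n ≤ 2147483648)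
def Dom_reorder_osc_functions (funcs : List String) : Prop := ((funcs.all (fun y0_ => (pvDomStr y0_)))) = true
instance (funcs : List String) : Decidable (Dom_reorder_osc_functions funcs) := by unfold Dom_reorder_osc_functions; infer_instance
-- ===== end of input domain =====

-- B replaces A's three separately-sorted bucket lists by one global sort followed by three
-- rank-based filters (alternative decomposition, same cost).

-- module constants shared by both Pythons
def g_libc_functions : List String :=
  ["memcpy", "memmove", "memset", "bcopy", "bzero",
   "strcpy", "strncpy", "strcat", "strncat", "strnlen", "vsnprintf"]

def g_safec_functions : List String :=
  ["memcmp_s", "memcpy_s", "strcat_s", "strcmp_s", "strcpy_s",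
   "strncat_s", "strncpy_s", "strnlen_s", "strstr_s"]

-- ===== PORT A =====
-- literal port: one loop appending to three bucket lists, each sorted, then concatenated
def stepA (st : List String × List String × List String) (func : String) :
    List String × List String × List String :=
  if func == "FILEMAGICS" || func == "SUM_STATS" then st
  else if g_libc_functions.contains func then (st.1 ++ [func], st.2.1, st.2.2)
  else if g_safec_functions.contains func then (st.1, st.2.1 ++ [func], st.2.2)
  else (st.1, st.2.1, st.2.2 ++ [func])

def reorder_osc_functions (funcs : List String) : List String :=
  let st := funcs.foldl stepA ([], [], [])
  let libc_funcs := PySem.List.sorted st.1 (fun x => x) false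
  let safec_funcs := PySem.List.sorted st.2.1 (fun x => x) false
  let other_funcs := PySem.List.sorted st.2.2 (fun x => x) false
  (([] ++ libc_funcs) ++ safec_funcs) ++ other_funcs

-- ===== PORT B =====
def pyRank (f : String) : Nat :=
  if g_libc_functions.contains f then 0
  else if g_safec_functions.contains f then 1
  else 2

def reorder_osc_functions_alt (funcs : List String) : List String :=
  let s := PySem.List.sorted
            (funcs.filter (fun f => !(f == "FILEMAGICS" || f == "SUM_STATS")))
            (fun x => x) false
  (s.filter (fun f => pyRank f == 0)) ++
  (s.filter (fun f => pyRank f == 1)) ++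
  (s.filter (fun f => pyRank f == 2))

-- ===== PRECONDITION & SPEC =====
def Spec_reorder_osc_functions (funcs : List String) (out : List String) : Prop := out = reorder_osc_functions_alt funcs
instance (funcs : List String) (out : List String) : Decidable (Spec_reorder_osc_functions funcs out) := by unfold Spec_reorder_osc_functions; infer_instance

-- ===== CLAIM (what is proved, stated in full; the proofs are below) =====
def Claim_equal_reorder_osc_functions : Prop := ∀ (funcs : List String), Dom_reorder_osc_functions funcs → Spec_reorder_osc_functions funcs (reorder_osc_functions funcs)

-- ===== LEMMAS AND PROOFS =====

-- the bucket predicates of A's loop, named so the proofs can treat them atomically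
def keepF (f : String) : Bool := !(f == "FILEMAGICS" || f == "SUM_STATS")
def p0 (f : String) : Bool := g_libc_functions.contains f
def p1 (f : String) : Bool := !g_libc_functions.contains f && g_safec_functions.contains f
def p2 (f : String) : Bool := !g_libc_functions.contains f && !g_safec_functions.contains f

-- A's loop computes, in each bucket, a filter of the (FILEMAGICS/SUM_STATS-free) input
theorem foldl_buckets (funcs : List String) (a b c : List String) :
    funcs.foldl stepA (a, b, c)
    = (a ++ (funcs.filter keepF).filter p0,
       b ++ (funcs.filter keepF).filter p1,
       c ++ (funcs.filter keepF).filter p2) := by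
  induction funcs generalizing a b c with
  | nil => simp
  | cons x xs ih =>
    rw [List.foldl_cons]
    by_cases h1 : (x == "FILEMAGICS" || x == "SUM_STATS") = true
    · have hk : keepF x = false := by simp [keepF, h1]
      have hx : stepA (a, b, c) x = (a, b, c) := by simp [stepA, h1]
      rw [hx, ih, List.filter_cons_of_neg (by simp [hk])]
    · have hk : keepF x = true := by simp [keepF]; simpa using h1
      rw [List.filter_cons_of_pos hk]
      by_cases h2 : x ∈ g_libc_functions
      · have hx : stepA (a, b, c) x = (a ++ [x], b, c) := by simp [stepA, h1, h2]
        rw [hx, ih,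
            List.filter_cons_of_pos (by simp [p0, h2]),
            List.filter_cons_of_neg (by simp [p1, h2]),
            List.filter_cons_of_neg (by simp [p2, h2])]
        simp
      · by_cases h3 : x ∈ g_safec_functions
        · have hx : stepA (a, b, c) x = (a, b ++ [x], c) := by simp [stepA, h1, h2, h3]
          rw [hx, ih,
              List.filter_cons_of_neg (by simp [p0, h2]),
              List.filter_cons_of_pos (by simp [p1, h2, h3]),
              List.filter_cons_of_neg (by simp [p2, h3])]
          simp
        · have hx : stepA (a, b, c) x = (a, b, c ++ [x]) := by simp [stepA, h1, h2, h3]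
          rw [hx, ih,
              List.filter_cons_of_neg (by simp [p0, h2]),
              List.filter_cons_of_neg (by simp [p1, h3]),
              List.filter_cons_of_pos (by simp [p2, h2, h3])]
          simp

-- filtering a sorted list is sorting the filtered list
theorem filter_sorted_id (xs : List String) (p : String → Bool) :
    (PySem.List.sorted xs (fun x => x) false).filter p
      = PySem.List.sorted (xs.filter p) (fun x => x) false := by
  have hperm : ((PySem.List.sorted xs (fun x => x) false).filter p).Perm (xs.filter p) :=
    (PySem.List.sorted_perm xs (fun x => x) false).filter p
  have hpair : ((PySem.List.sorted xs (fun x => x) false).filter p).Pairwise (· ≤ ·) :=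
    (PySem.List.sorted_pairwise xs (fun x => x)).filter p
  exact (PySem.List.sorted_id_eq_of_perm_of_pairwise _ _ hperm hpair).symm

-- ===== VERDICT (by name: the statement is the Claim_ definition above) =====
theorem reorder_osc_functions_spec : Claim_equal_reorder_osc_functions := by
  intro funcs _
  show reorder_osc_functions funcs = reorder_osc_functions_alt funcs
  unfold reorder_osc_functions reorder_osc_functions_alt
  rw [foldl_buckets]
  have congr0 : ∀ (s : List String), s.filter (fun f => pyRank f == 0) = s.filter p0 := by
    intro s; apply List.filter_congr; intro x _; simp [pyRank, p0]; split_ifs <;> simp_all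
  have congr1 : ∀ (s : List String), s.filter (fun f => pyRank f == 1) = s.filter p1 := by
    intro s; apply List.filter_congr; intro x _; simp [pyRank, p1]; split_ifs <;> simp_all
  have congr2 : ∀ (s : List String), s.filter (fun f => pyRank f == 2) = s.filter p2 := by
    intro s; apply List.filter_congr; intro x _; simp [pyRank, p2]; split_ifs <;> simp_all
  simp only [congr0, congr1, congr2, filter_sorted_id, List.nil_append]
  have hkeep : funcs.filter (fun f => !(f == "FILEMAGICS" || f == "SUM_STATS")) = funcs.filter keepF := by
    apply List.filter_congr; intro x _; simp [keepF]
  rw [hkeep]
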